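-- pv_equiv track=rewrite | github.com/Tratut/home_work_bin_agapov | ft_additional_code.py | ft_straight_code
-- ===== SOURCE A (Python) =====
-- def ft_straight_code(x):
--     cop = x
--     b = 0
--     i = 0
--     bad = False
--
--     if cop < 0:
--         cop *= -1
--         bad = True
--
--     while cop > 0:
--         b = (cop % 2) * 10 ** i + b
--         cop //= 2
--         i += 1
--     if bad:
--         return b + 1 * 10 ** 7
--     else:
--         return b
-- ===== SOURCE B (Python) =====
-- def ft_straight_code(x):
--     b = int(bin(abs(x))[2:])
--     return b + 10 ** 7 if x < 0 else b
-- ===== Notes on version B (the rewrite author's own statement) =====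
-- stated objective: idiomatic
-- what changed: Replaces the explicit lsb-first bit-extraction loop (cop % 2 placed at 10**i, cop //= 2) with the idiomatic one-liner int(bin(abs(x))[2:]) that builds the msb-first binary string and parses it as a decimal number, plus the sign offset.
import Mathlib
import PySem

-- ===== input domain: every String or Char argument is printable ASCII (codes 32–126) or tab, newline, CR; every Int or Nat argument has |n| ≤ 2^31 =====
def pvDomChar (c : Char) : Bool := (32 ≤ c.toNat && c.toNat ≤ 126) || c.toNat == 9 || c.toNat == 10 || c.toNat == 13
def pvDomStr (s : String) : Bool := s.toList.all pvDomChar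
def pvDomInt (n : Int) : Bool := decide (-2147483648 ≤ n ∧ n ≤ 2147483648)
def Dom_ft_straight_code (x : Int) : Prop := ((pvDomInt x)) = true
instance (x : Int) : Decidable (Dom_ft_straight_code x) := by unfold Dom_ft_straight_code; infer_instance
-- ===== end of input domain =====

-- B replaces A's lsb-first bit-extraction loop (cop % 2 placed at 10^i) by building the
-- msb-first binary digit string of |x| and parsing it as a decimal number (simpler, no
-- index/power bookkeeping); same value everywhere.

-- ===== PORT A =====
-- the while loop of A: state (cop, b, i); 10 ** i ported as 10 ^ i with i : Nat (i starts
-- at 0 and only increments, so it is exactly Python's nonnegative exponent)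
def ftLoopA (cop b : Int) (i : Nat) : Int :=
  if h : cop > 0 then
    ftLoopA (PySem.Int.floordiv cop 2) ((PySem.Int.mod cop 2) * 10 ^ i + b) (i + 1)
  else b
termination_by cop.toNat
decreasing_by
  have h2 : PySem.Int.floordiv cop 2 = cop / 2 := PySem.Int.floordiv_eq_ediv_of_pos (by omega)
  rw [h2]; omega

def ft_straight_code (x : Int) : Int :=
  let cop := x
  let bad := false
  let (cop, bad) := if cop < 0 then (cop * (-1), true) else (cop, bad)
  let b := ftLoopA cop 0 0
  if bad then b + 1 * 10 ^ 7 else b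

-- ===== PORT B =====
-- bin(n)[2:] for n > 0: msb-first binary digits, by repeated division (exact: bin's digits)
def binDigits (n : Nat) : List Nat :=
  if n = 0 then [] else binDigits (n / 2) ++ [n % 2]

-- int(<digit string>): left fold acc*10 + digit (exact for the 0/1-digit strings bin yields)
def parseDec (ds : List Nat) : Int :=
  ds.foldl (fun (a : Int) (d : Nat) => a * 10 + (d : Int)) 0

def ft_straight_code_alt (x : Int) : Int :=
  let ds := if x.natAbs = 0 then [0] else binDigits x.natAbs  -- bin(abs(x))[2:] (bin(0) = '0b0')
  let b := parseDec ds
  if x < 0 then b + 10 ^ 7 else b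

-- ===== PRECONDITION & SPEC =====
def Spec_ft_straight_code (x : Int) (out : Int) : Prop := out = ft_straight_code_alt x
instance (x : Int) (out : Int) : Decidable (Spec_ft_straight_code x out) := by unfold Spec_ft_straight_code; infer_instance

-- ===== CLAIM (what is proved, stated in full; the proofs are below) =====
def Claim_equal_ft_straight_code : Prop := ∀ (x : Int), Dom_ft_straight_code x → Spec_ft_straight_code x (ft_straight_code x)

-- ===== LEMMAS AND PROOFS =====

-- the common reference value: decimal-encoded binary of n
def decBin (n : Nat) : Int :=
  if n = 0 then 0 else decBin (n / 2) * 10 + (n % 2 : Nat)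

theorem ftLoopA_eq (m : Nat) : ∀ (cop b : Int) (i : Nat), cop.toNat = m →
    ftLoopA cop b i = b + decBin m * 10 ^ i := by
  induction m using Nat.strong_induction_on with
  | _ m ih =>
    intro cop b i hm
    rw [ftLoopA]
    by_cases h : cop > 0
    · have h2 : PySem.Int.floordiv cop 2 = cop / 2 := PySem.Int.floordiv_eq_ediv_of_pos (by omega)
      have h3 : PySem.Int.mod cop 2 = cop % 2 := PySem.Int.mod_eq_emod_of_pos (by omega)
      simp only [h, dif_pos, h2, h3]
      have hlt : (cop / 2).toNat < m := by omega
      rw [ih _ hlt (cop / 2) _ (i + 1) rfl]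
      have hd : decBin m = decBin ((cop / 2).toNat) * 10 + ((m % 2 : Nat) : Int) := by
        rw [decBin]
        have : m ≠ 0 := by omega
        simp only [this, if_false]
        have : (cop / 2).toNat = m / 2 := by omega
        rw [this]
      rw [hd]
      have hmod : ((m % 2 : Nat) : Int) = cop % 2 := by omega
      rw [hmod]
      ring
    · have : m = 0 := by omega
      simp [h, this, decBin]

theorem parse_binDigits (m : Nat) : parseDec (binDigits m) = decBin m := by
  induction m using Nat.strong_induction_on with
  | _ m ih =>
    by_cases h : m = 0
    · simp [h, binDigits, parseDec, decBin]
    · rw [binDigits, decBin]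
      simp only [h, if_false]
      unfold parseDec
      rw [List.foldl_append]
      have := ih (m / 2) (by omega)
      unfold parseDec at this
      rw [this]
      simp

-- ===== VERDICT (by name: the statement is the Claim_ definition above) =====
theorem ft_straight_code_spec : Claim_equal_ft_straight_code := by
  intro x _
  unfold Spec_ft_straight_code ft_straight_code ft_straight_code_alt
  by_cases h : x < 0
  · have hx : (x * (-1)).toNat = x.natAbs := by omega
    simp only [h, if_true]
    rw [ftLoopA_eq x.natAbs _ _ _ hx]
    have hne : x.natAbs ≠ 0 := by omega
    simp [hne, parse_binDigits]
  · have hx : x.toNat = x.natAbs := by omega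
    simp only [h, if_false]
    rw [ftLoopA_eq x.natAbs _ _ _ hx]
    by_cases h0 : x.natAbs = 0
    · simp [h0, decBin, parseDec]
    · simp [h0, parse_binDigits]
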